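-- pv_equiv track=rewrite | github.com/katjpg/ginkgo | nlp/semantics.py | validate_acronym
-- ===== SOURCE A (Python) =====
-- def validate_acronym(acronym: str, expansion: str) -> bool:
--     """
--     Check if an acronym (e.g., 'CNN') matches an expansion.
--
--     Implements the Schwartz-Hearst algorithm for:
--     - Leading articles (e.g., 'a', 'the')
--     - Internal function words
--     - Hyphenated terms
--     """
--     # filter leading articles
--     expansion_words = expansion.split()
--     filtered_words = [w for w in expansion_words if w.lower() not in ("a", "an", "the")]
--
--     if not filtered_words:
--         return False
--
--     # extract initial letters from content words
--     first_letters = "".join(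
--         w[0].upper() for w in filtered_words if w and w[0].isalpha()
--     )
--
--     # normalize acronym for comparison
--     acronym_clean = "".join(c.upper() for c in acronym if c.isalpha())
--
--     if not acronym_clean:
--         return False
--
--     # exact match (highest confidence)
--     if acronym_clean == first_letters:
--         return True
--
--     # subsequence match (allows intermediate words)
--     if len(acronym_clean) <= len(first_letters):
--         acronym_idx = 0
--         for letter in first_letters:
--             if (
--                 acronym_idx < len(acronym_clean)
--                 and letter == acronym_clean[acronym_idx]
--             ):
--                 acronym_idx += 1
--
--         # require first character match (Schwartz-Hearst constraint)
--         if acronym_idx == len(acronym_clean) and acronym_clean[0] == first_letters[0]: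
--             return True
--
--     return False
-- ===== SOURCE B (Python) =====
-- def validate_acronym(acronym: str, expansion: str) -> bool:
--     # filter leading articles (same preprocessing as the original)
--     content = [w for w in expansion.split() if w.lower() not in ("a", "an", "the")]
--     if not content:
--         return False
--     initials = [w[0].upper() for w in content if w and w[0].isalpha()]
--     target = [c.upper() for c in acronym if c.isalpha()]
--     if not target:
--         return False
--     # build a position index once: each initial letter -> its list of positions;
--     # then match the acronym by jumping through position lists (the leftmost
--     # position strictly after the previous match), instead of scanning the
--     # initials with a moving pointer.
--     pos_by_char = {}
--     for i, ch in enumerate(initials):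
--         pos_by_char.setdefault(ch, []).append(i)
--     prev = -1
--     for ch in target:
--         prev = next((p for p in pos_by_char.get(ch, []) if p > prev), None)
--         if prev is None:
--             return False
--     # Schwartz-Hearst first-character anchor
--     return target[0] == initials[0]
-- ===== Notes on version B (the rewrite author's own statement) =====
-- stated objective: alternative
-- what changed: B replaces A's moving-pointer greedy scan over the initials string with a position index built once (letter -> list of positions) and a per-acronym-character jump to the leftmost indexed position after the previous match, dropping A's redundant exact-match and length branches.
import Mathlib
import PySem

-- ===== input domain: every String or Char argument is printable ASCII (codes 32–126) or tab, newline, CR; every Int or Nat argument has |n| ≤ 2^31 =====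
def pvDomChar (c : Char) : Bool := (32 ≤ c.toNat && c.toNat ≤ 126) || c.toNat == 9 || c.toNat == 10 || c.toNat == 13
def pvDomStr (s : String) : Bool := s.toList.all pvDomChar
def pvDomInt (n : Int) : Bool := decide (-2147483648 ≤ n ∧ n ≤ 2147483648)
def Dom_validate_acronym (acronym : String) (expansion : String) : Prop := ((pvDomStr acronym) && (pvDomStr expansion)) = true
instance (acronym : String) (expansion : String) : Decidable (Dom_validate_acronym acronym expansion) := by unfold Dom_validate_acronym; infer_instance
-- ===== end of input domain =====

-- B replaces A's moving-pointer greedy scan over the initials with a position index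
-- (letter -> list of positions, built once) and per-character jumps to the leftmost
-- indexed position after the previous match; objective: alternative (same cost class).
-- Shared preprocessing (split / article filter / initials / cleaned acronym) is
-- factored into helpers used verbatim by both ports, as in both Pythons.

-- ===== PORT A =====
-- shared preprocessing helpers (identical lines in Source A and Source B)
def pvFilteredWords (expansion : String) : List (List Char) :=
  (PySem.Chars.split₀ expansion.toList).filter
    (fun w => !([['a'], ['a','n'], ['t','h','e']].contains (PySem.Chars.lower w)))

def pvFirstLetters (ws : List (List Char)) : List Char :=
  ws.flatMap (fun w =>
    match w with
    | [] => []
    | c :: _ => if PySem.Chars.isalpha c then [PySem.Chars.upperChar c] else [])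

def pvAcronymClean (acronym : String) : List Char :=
  acronym.toList.flatMap (fun c =>
    if PySem.Chars.isalpha c then [PySem.Chars.upperChar c] else [])

def validate_acronym (acronym : String) (expansion : String) : Bool :=
  let filtered_words := pvFilteredWords expansion
  if filtered_words.isEmpty then false
  else
    let first_letters := pvFirstLetters filtered_words
    let acronym_clean := pvAcronymClean acronym
    if acronym_clean.isEmpty then false
    else if acronym_clean = first_letters then true
    else if acronym_clean.length ≤ first_letters.length then
      let idx := first_letters.foldl
        (fun acronym_idx letter =>
          if h : acronym_idx < acronym_clean.length then
            if letter = acronym_clean[acronym_idx] then acronym_idx + 1 else acronym_idx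
          else acronym_idx) 0
      if idx = acronym_clean.length ∧
          PySem.List.pyGet? acronym_clean 0 = PySem.List.pyGet? first_letters 0 then true
      else false
    else false

-- ===== PORT B =====
-- 'for i, ch in enumerate(initials): pos_by_char.setdefault(ch, []).append(i)'
def pvPosDict (fs : List Char) : PySem.Dict Char (List Int) :=
  (PySem.List.enumerate fs 0).foldl
    (fun d p => d.modify p.2 [] (fun l => l ++ [p.1])) PySem.Dict.empty

-- 'for ch in target: prev = next((p for p in pos_by_char.get(ch, []) if p > prev), None); …'
def pvJump (d : PySem.Dict Char (List Int)) : List Char → Int → Option Int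
  | [], prev => some prev
  | c :: cs, prev =>
    match (d.getD c []).find? (fun p => decide (prev < p)) with
    | none => none
    | some p => pvJump d cs p

def validate_acronym_alt (acronym : String) (expansion : String) : Bool :=
  let content := pvFilteredWords expansion
  if content.isEmpty then false
  else
    let initials := pvFirstLetters content
    let target := pvAcronymClean acronym
    if target.isEmpty then false
    else
      match pvJump (pvPosDict initials) target (-1) with
      | none => false
      | some _ =>
        -- target nonempty; initials nonempty whenever the jump loop succeeded
        decide (PySem.List.pyGet? target 0 = PySem.List.pyGet? initials 0)

-- ===== PRECONDITION & SPEC =====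
def Spec_validate_acronym (acronym : String) (expansion : String) (out : Bool) : Prop := out = validate_acronym_alt acronym expansion
instance (acronym : String) (expansion : String) (out : Bool) : Decidable (Spec_validate_acronym acronym expansion out) := by unfold Spec_validate_acronym; infer_instance

-- ===== CLAIM (what is proved, stated in full; the proofs are below) =====
def Claim_equal_validate_acronym : Prop := ∀ (acronym : String) (expansion : String), Dom_validate_acronym acronym expansion → Spec_validate_acronym acronym expansion (validate_acronym acronym expansion)

-- ===== LEMMAS AND PROOFS =====

/-- Proof-side greedy subsequence consumption, the common ground of both ports. -/
def pvConsume : List Char → List Char → Bool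
  | [], _ => true
  | _ :: _, [] => false
  | c :: cs, f :: fs => if f = c then pvConsume cs fs else pvConsume (c :: cs) fs

/-- Proof-side: the positions (starting at `s`) of `c` in `fs`, in increasing order. -/
def pvPositions (fs : List Char) (s : Int) (c : Char) : List Int :=
  ((PySem.List.enumerate fs s).filter (fun p => p.2 == c)).map (fun p => p.1)

/-- Proof-side: least index `i ≥ j` with `fs[i] = c`. -/
def pvNextFrom : List Char → Char → Nat → Option Nat
  | [], _, _ => none
  | f :: fs, c, 0 => if f = c then some 0 else (pvNextFrom fs c 0).map (· + 1)
  | _ :: fs, c, j + 1 => (pvNextFrom fs c j).map (· + 1)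

theorem pvConsume_refl (cs : List Char) : pvConsume cs cs = true := by
  induction cs with
  | nil => rfl
  | cons c cs ih => simp [pvConsume, ih]

theorem pvConsume_length_le (cs fs : List Char) (h : pvConsume cs fs = true) :
    cs.length ≤ fs.length := by
  induction fs generalizing cs with
  | nil => cases cs with
    | nil => simp
    | cons c cs => simp [pvConsume] at h
  | cons f fs ih =>
    cases cs with
    | nil => simp
    | cons c cs =>
      simp only [pvConsume] at h
      by_cases hfc : f = c
      · simp only [if_pos hfc] at h
        have := ih _ h; simpa using this
      · simp only [if_neg hfc] at h
        have := ih _ h; simp at this ⊢; omega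

/-- A's greedy index loop, started at `idx ≤ len`, reaches `len` exactly when the
    remaining acronym suffix is consumed by the letters list. -/
theorem pvGreedy_spec (ac : List Char) (fs : List Char) (idx : Nat) (hidx : idx ≤ ac.length) :
    (fs.foldl
        (fun i letter =>
          if h : i < ac.length then
            if letter = ac[i] then i + 1 else i
          else i) idx = ac.length)
      ↔ pvConsume (ac.drop idx) fs = true := by
  induction fs generalizing idx with
  | nil =>
    simp only [List.foldl_nil]
    constructor
    · intro h; subst h; simp [pvConsume, List.drop_length]
    · intro h
      cases hlt : (ac.drop idx) with
      | nil => have := List.drop_eq_nil_iff.mp hlt; omega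
      | cons c cs => rw [hlt] at h; simp [pvConsume] at h
  | cons f fs ih =>
    simp only [List.foldl_cons]
    by_cases hlt : idx < ac.length
    · have hdrop : ac.drop idx = ac[idx] :: ac.drop (idx + 1) :=
        List.drop_eq_getElem_cons hlt
      by_cases heq : f = ac[idx]
      · rw [dif_pos hlt, if_pos heq, ih (idx + 1) (by omega), hdrop, heq]
        simp [pvConsume]
      · rw [dif_pos hlt, if_neg heq, ih idx hidx, hdrop]
        simp only [pvConsume, if_neg heq]
    · have hnil : ac.drop idx = [] := List.drop_eq_nil_iff.mpr (by omega)
      rw [dif_neg hlt, ih idx hidx, hnil]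
      simp [pvConsume]

/-- Consuming `c :: cs` from the `j`-th suffix = jump to the next occurrence of `c`. -/
theorem pvConsume_drop (c : Char) (cs fs : List Char) (j : Nat) :
    pvConsume (c :: cs) (fs.drop j)
      = match pvNextFrom fs c j with
        | none => false
        | some i => pvConsume cs (fs.drop (i + 1)) := by
  induction fs generalizing j with
  | nil => cases j <;> simp [pvNextFrom, pvConsume]
  | cons f fs ih =>
    cases j with
    | zero =>
      by_cases hfc : f = c
      · simp [pvNextFrom, hfc, pvConsume]
      · have hcf : ¬ c = f := fun h => hfc h.symm
        simp only [List.drop_zero, pvConsume, pvNextFrom, if_neg hfc]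
        have := ih 0
        simp only [List.drop_zero] at this
        rw [this]
        cases pvNextFrom fs c 0 <;> simp
    | succ j =>
      simp only [List.drop_succ_cons, pvNextFrom, ih j]
      cases pvNextFrom fs c j <;> simp

/-- Structural unfolding of the position list. -/
theorem pvPositions_cons (f : Char) (fs : List Char) (s : Int) (c : Char) :
    pvPositions (f :: fs) s c
      = if f = c then s :: pvPositions fs (s + 1) c else pvPositions fs (s + 1) c := by
  simp only [pvPositions, PySem.List.enumerate_cons, List.filter_cons]
  by_cases hfc : f = c <;> simp [hfc]

/-- Every recorded position is at least the enumeration start. -/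
theorem pvPositions_ge (fs : List Char) (s : Int) (c : Char) :
    ∀ p ∈ pvPositions fs s c, s ≤ p := by
  induction fs generalizing s with
  | nil => simp [pvPositions, PySem.List.enumerate_nil]
  | cons f fs ih =>
    intro p hp
    rw [pvPositions_cons] at hp
    by_cases hfc : f = c
    · rw [if_pos hfc] at hp
      rcases List.mem_cons.mp hp with h | h
      · omega
      · have := ih (s + 1) p h; omega
    · rw [if_neg hfc] at hp
      have := ih (s + 1) p hp; omega

/-- find? is determined by the predicate's values on the list's members. -/
theorem pvFind?_congr {α : Type} (l : List α) (p q : α → Bool)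
    (h : ∀ x ∈ l, p x = q x) : l.find? p = l.find? q := by
  induction l with
  | nil => rfl
  | cons x xs ih =>
    simp only [List.find?_cons, h x (by simp)]
    cases q x <;> simp [ih (fun y hy => h y (by simp [hy]))]

/-- The first indexed position of `c` strictly after `s + j - 1` is `s +` (the least
    index `i ≥ j` with `fs[i] = c`). -/
theorem pvFind_positions (fs : List Char) (c : Char) (s : Int) (j : Nat) :
    (pvPositions fs s c).find? (fun p => decide (s + (j : Int) - 1 < p))
      = Option.map (fun i : Nat => s + (i : Int)) (pvNextFrom fs c j) := by
  induction fs generalizing s j with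
  | nil => simp [pvPositions, PySem.List.enumerate_nil, pvNextFrom]
  | cons f fs ih =>
    have hpos := pvPositions_cons f fs s c
    cases j with
    | zero =>
      by_cases hfc : f = c
      · rw [hpos, if_pos hfc]
        simp [pvNextFrom, hfc]
      · rw [hpos, if_neg hfc]
        have hcong : (pvPositions fs (s + 1) c).find? (fun p => decide (s + ((0:Nat) : Int) - 1 < p))
            = (pvPositions fs (s + 1) c).find? (fun p => decide ((s + 1) + ((0:Nat) : Int) - 1 < p)) := by
          apply pvFind?_congr
          intro x hx
          have := pvPositions_ge fs (s + 1) c x hx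
          simp only [decide_eq_decide]; omega
        rw [hcong, ih (s + 1) 0]
        simp only [pvNextFrom, if_neg hfc]
        cases pvNextFrom fs c 0 with
        | none => simp
        | some i => simp; ring
    | succ j =>
      have step : (pvPositions (f :: fs) s c).find? (fun p => decide (s + ((j + 1 : Nat) : Int) - 1 < p))
          = (pvPositions fs (s + 1) c).find? (fun p => decide ((s + 1) + (j : Int) - 1 < p)) := by
        rw [hpos]
        by_cases hfc : f = c
        · rw [if_pos hfc]
          have hhead : (decide (s + ((j + 1 : Nat) : Int) - 1 < s)) = false := by
            simp only [decide_eq_false_iff_not]; omega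
          simp only [List.find?_cons, hhead]
          apply pvFind?_congr
          intro x _
          simp only [decide_eq_decide]; push_cast; omega
        · rw [if_neg hfc]
          apply pvFind?_congr
          intro x _
          simp only [decide_eq_decide]; push_cast; omega
      rw [step, ih (s + 1) j]
      simp only [pvNextFrom]
      cases hn : pvNextFrom fs c j with
      | none => simp
      | some i => simp; ring

/-- The position dict's lists are exactly the position lists starting at 0. -/
theorem pvPosDict_getD (fs : List Char) (c : Char) :
    (pvPosDict fs).getD c [] = pvPositions fs 0 c := by
  have hswap : pvPosDict fs
      = ((PySem.List.enumerate fs 0).map Prod.swap).foldl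
          (fun d p => d.modify p.1 [] (fun l => l ++ [p.2])) PySem.Dict.empty := by
    rw [List.foldl_map]
    rfl
  rw [hswap, PySem.Dict.getD_foldl_modify_append]
  simp only [PySem.Dict.getD_empty, List.nil_append, List.filter_map, pvPositions]
  rw [List.map_map]
  apply congrArg
  apply List.filter_congr
  intro p _
  simp [Prod.swap]

/-- The jump loop (started at `j - 1`) succeeds exactly when the target is consumed
    by the `j`-th suffix of the initials. -/
theorem pvJump_spec (fs : List Char) (target : List Char) (j : Nat) :
    (pvJump (pvPosDict fs) target ((j : Int) - 1)).isSome = pvConsume target (fs.drop j) := by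
  induction target generalizing j with
  | nil => simp [pvJump, pvConsume]
  | cons c cs ih =>
    have hcong : ((pvPosDict fs).getD c []).find? (fun p => decide ((j : Int) - 1 < p))
        = (pvPositions fs 0 c).find? (fun p => decide ((j : Int) - 1 < p)) := by
      rw [pvPosDict_getD]
    have hfp := pvFind_positions fs c 0 j
    simp only [zero_add] at hfp
    rw [pvConsume_drop c cs fs j]
    cases hn : pvNextFrom fs c j with
    | none =>
      rw [hn, Option.map_none] at hfp
      simp only [pvJump]
      rw [hcong, hfp]
      rfl
    | some i =>
      rw [hn, Option.map_some] at hfp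
      simp only [pvJump]
      rw [hcong, hfp]
      show (pvJump (pvPosDict fs) cs ((i : Nat) : Int)).isSome = pvConsume cs (List.drop (i + 1) fs)
      have hcast : ((i : Nat) : Int) = ((i + 1 : Nat) : Int) - 1 := by push_cast; ring
      rw [hcast, ih (i + 1)]

/-- Equality of the two tails of the ports, after the shared guards. -/
theorem pvTail_eq (ac fl : List Char) (hane : ac ≠ []) :
    (if ac = fl then true
     else if ac.length ≤ fl.length then
       if (fl.foldl
            (fun acronym_idx letter =>
              if h : acronym_idx < ac.length then
                if letter = ac[acronym_idx] then acronym_idx + 1 else acronym_idx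
              else acronym_idx) 0 = ac.length) ∧
           PySem.List.pyGet? ac 0 = PySem.List.pyGet? fl 0 then true
       else false
     else false)
    = (match pvJump (pvPosDict fl) ac (-1) with
       | none => false
       | some _ => decide (PySem.List.pyGet? ac 0 = PySem.List.pyGet? fl 0)) := by
  have hjump : (pvJump (pvPosDict fl) ac (-1)).isSome = pvConsume ac fl := by
    have := pvJump_spec fl ac 0
    simpa using this
  obtain ⟨a0, ar, hac0⟩ := List.exists_cons_of_ne_nil hane
  subst hac0
  by_cases heq : a0 :: ar = fl
  · subst heq
    rw [if_pos rfl]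
    rw [pvConsume_refl] at hjump
    cases hj : pvJump (pvPosDict (a0 :: ar)) (a0 :: ar) (-1) with
    | none => rw [hj] at hjump; simp at hjump
    | some p => simp
  · rw [if_neg heq]
    have hgreedy := pvGreedy_spec (a0 :: ar) fl 0 (by omega)
    simp only [List.drop_zero] at hgreedy
    by_cases hcons : pvConsume (a0 :: ar) fl = true
    · have hlen : (a0 :: ar).length ≤ fl.length := pvConsume_length_le _ _ hcons
      rw [if_pos hlen]
      rw [hcons] at hjump
      cases hj : pvJump (pvPosDict fl) (a0 :: ar) (-1) with
      | none => rw [hj] at hjump; simp at hjump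
      | some p =>
        by_cases hanch : PySem.List.pyGet? (a0 :: ar) 0 = PySem.List.pyGet? fl 0
        · rw [if_pos ⟨hgreedy.mpr hcons, hanch⟩]
          simp at hanch
          simp [hanch]
        · rw [if_neg (fun h => hanch h.2)]
          simp at hanch
          simp [hanch]
    · have hfoldne : ¬ (fl.foldl
          (fun acronym_idx letter =>
            if h : acronym_idx < (a0 :: ar).length then
              if letter = (a0 :: ar)[acronym_idx] then acronym_idx + 1 else acronym_idx
            else acronym_idx) 0 = (a0 :: ar).length) :=
        fun h => hcons (hgreedy.mp h)
      have hjnone : pvJump (pvPosDict fl) (a0 :: ar) (-1) = none := by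
        cases hj : pvJump (pvPosDict fl) (a0 :: ar) (-1) with
        | none => rfl
        | some p => rw [hj] at hjump; simp at hjump; exact absurd hjump hcons
      rw [hjnone]
      by_cases hlen : (a0 :: ar).length ≤ fl.length
      · rw [if_pos hlen, if_neg (fun h => hfoldne h.1)]
      · rw [if_neg hlen]

theorem validate_acronym_eq (acronym : String) (expansion : String) :
    validate_acronym acronym expansion = validate_acronym_alt acronym expansion := by
  unfold validate_acronym validate_acronym_alt
  by_cases hwe : (pvFilteredWords expansion).isEmpty
  · simp [hwe]
  · simp only [hwe, Bool.false_eq_true, if_false]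
    by_cases hae : (pvAcronymClean acronym).isEmpty
    · simp [hae]
    · simp only [hae, Bool.false_eq_true, if_false]
      exact pvTail_eq _ _ (by simpa [List.isEmpty_iff] using hae)

-- ===== VERDICT (by name: the statement is the Claim_ definition above) =====
theorem validate_acronym_spec : Claim_equal_validate_acronym := by
  intro acronym expansion _
  unfold Spec_validate_acronym
  exact validate_acronym_eq acronym expansion
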